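-- pv_equiv track=rewrite | github.com/albi-c/mineclone | scripts/cube_faces.py | get_vertices_from_edges
-- ===== SOURCE A (Python) =====
-- def get_vertices_from_edges(edges):
--     verts = [edges[0][0]]
--     for i in list(range(3)):
--         for a, b in edges:
--             if a == verts[-1] and b not in verts:
--                 verts.append(b)
--                 break
--             if b == verts[-1] and a not in verts:
--                 verts.append(a)
--                 break
--     return verts
-- ===== SOURCE B (Python) =====
-- def get_vertices_from_edges(edges):
--     adj = {}
--     for a, b in edges:
--         adj.setdefault(a, []).append(b)
--         adj.setdefault(b, []).append(a)
--     verts = [edges[0][0]]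
--     for _ in range(3):
--         nxt = next((n for n in adj[verts[-1]] if n not in verts), None)
--         if nxt is None:
--             break
--         verts.append(nxt)
--     return verts
-- ===== Notes on version B (the rewrite author's own statement) =====
-- stated objective: alternative
-- what changed: B builds an adjacency dict once (both directions per edge, in edge order) and extends the path by taking the first unvisited neighbor of the last vertex, stopping early, instead of A's rescanning the whole edge list with two match branches at each of the three fixed iterations.
import Mathlib
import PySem

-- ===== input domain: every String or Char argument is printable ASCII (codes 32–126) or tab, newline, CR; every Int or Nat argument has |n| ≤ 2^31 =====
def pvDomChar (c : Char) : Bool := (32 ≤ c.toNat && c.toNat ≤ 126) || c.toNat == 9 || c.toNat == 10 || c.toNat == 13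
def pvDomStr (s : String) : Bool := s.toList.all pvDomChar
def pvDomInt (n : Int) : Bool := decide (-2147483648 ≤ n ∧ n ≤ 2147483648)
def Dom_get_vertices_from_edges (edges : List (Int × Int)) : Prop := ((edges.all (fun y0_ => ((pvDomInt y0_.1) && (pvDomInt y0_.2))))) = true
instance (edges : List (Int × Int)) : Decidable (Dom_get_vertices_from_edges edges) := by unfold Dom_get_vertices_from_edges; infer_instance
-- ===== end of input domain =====

-- B builds an adjacency dict once and repeatedly takes the first unvisited neighbor of the
-- last vertex (stopping early), instead of A's rescanning the edge list three times.

-- ===== PORT A =====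
-- inner 'for a, b in edges: … break' scan of one iteration of A's outer loop
def pvScanA (verts : List Int) : List (Int × Int) → List Int
  | [] => verts
  | (a, b) :: rest =>
    if PySem.List.pyGet? verts (-1) == some a && !(verts.contains b) then verts ++ [b]
    else if PySem.List.pyGet? verts (-1) == some b && !(verts.contains a) then verts ++ [a]
    else pvScanA verts rest

def get_vertices_from_edges (edges : List (Int × Int)) : List Int :=
  match PySem.List.pyGet? edges 0 with
  | none => []   -- Python raises IndexError here (edges[0]); excluded by Pre_
  | some e => (PySem.List.pyRange 0 3 1).foldl (fun verts _ => pvScanA verts edges) [e.1]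

-- ===== PORT B =====
-- adj.setdefault(k, []).append(x)  ==  adj[k] = adj.get(k, []) + [x]  ==  Dict.modify
def pvAdjStep (d : PySem.Dict Int (List Int)) (e : Int × Int) : PySem.Dict Int (List Int) :=
  (d.modify e.1 [] (· ++ [e.2])).modify e.2 [] (· ++ [e.1])

def pvAdj (edges : List (Int × Int)) : PySem.Dict Int (List Int) :=
  edges.foldl pvAdjStep PySem.Dict.empty

-- the 'for _ in range(3): … break' walk; adj[verts[-1]] is always a present key in B's
-- reachable states, so getD [] is exact
def pvWalk (adj : PySem.Dict Int (List Int)) : Nat → List Int → List Int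
  | 0, verts => verts
  | k+1, verts =>
    match (adj.getD ((PySem.List.pyGet? verts (-1)).getD 0) []).find? (fun n => !(verts.contains n)) with
    | none => verts
    | some n => pvWalk adj k (verts ++ [n])

def get_vertices_from_edges_alt (edges : List (Int × Int)) : List Int :=
  match PySem.List.pyGet? edges 0 with
  | none => []   -- Python raises IndexError here (edges[0]); excluded by Pre_
  | some e => pvWalk (pvAdj edges) 3 [e.1]

-- ===== PRECONDITION & SPEC =====
-- A raises IndexError (edges[0]) exactly on the empty list; excluded, nothing else.
def Pre_get_vertices_from_edges (edges : List (Int × Int)) : Prop := edges ≠ []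
instance (edges : List (Int × Int)) : Decidable (Pre_get_vertices_from_edges edges) := by
  unfold Pre_get_vertices_from_edges; infer_instance

def pvWitness_get_vertices_from_edges : (List (Int × Int)) :=
  [(0, 1), (1, 2), (2, 3), (3, 0)]

def Spec_get_vertices_from_edges (edges : List (Int × Int)) (out : List Int) : Prop := out = get_vertices_from_edges_alt edges
instance (edges : List (Int × Int)) (out : List Int) : Decidable (Spec_get_vertices_from_edges edges out) := by unfold Spec_get_vertices_from_edges; infer_instance

-- ===== CLAIM (what is proved, stated in full; the proofs are below) =====
def Claim_equal_get_vertices_from_edges : Prop := ∀ (edges : List (Int × Int)), Dom_get_vertices_from_edges edges → Pre_get_vertices_from_edges edges → Spec_get_vertices_from_edges edges (get_vertices_from_edges edges)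

-- ===== LEMMAS AND PROOFS =====

-- neighbors of v contributed by edges, in edge order, a's side before b's side
def pvNbrs (edges : List (Int × Int)) (v : Int) : List Int :=
  edges.flatMap (fun e => (if v = e.1 then [e.2] else []) ++ (if v = e.2 then [e.1] else []))

theorem pvAdj_getD (edges : List (Int × Int)) (d : PySem.Dict Int (List Int)) (v : Int) :
    (edges.foldl pvAdjStep d).getD v [] = d.getD v [] ++ pvNbrs edges v := by
  induction edges generalizing d with
  | nil => simp [pvNbrs]
  | cons e rest ih =>
    obtain ⟨a, b⟩ := e
    simp only [List.foldl_cons, ih, pvNbrs, List.flatMap_cons]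
    rw [← List.append_assoc]
    congr 1
    simp only [pvAdjStep, PySem.Dict.getD_modify]
    by_cases h1 : v = a <;> by_cases h2 : v = b <;>
      simp_all [eq_comm (a := v)]

theorem pvScanA_eq (edges : List (Int × Int)) (verts : List Int) (l : Int)
    (h : verts.getLast? = some l) :
    pvScanA verts edges =
      match (pvNbrs edges l).find? (fun n => !(verts.contains n)) with
      | none => verts
      | some n => verts ++ [n] := by
  induction edges with
  | nil => simp [pvScanA, pvNbrs]
  | cons e rest ih =>
    obtain ⟨a, b⟩ := e
    simp only [pvScanA, pvNbrs, List.flatMap_cons, List.find?_append,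
      PySem.List.pyGet?_neg_one, h]
    by_cases ha : l = a <;> by_cases hb : l = b <;>
      by_cases hva : verts.contains a <;> by_cases hvb : verts.contains b <;>
        simp_all [pvNbrs, Option.or]

-- proof-side reading of A's outer loop: k iterations of the full edge scan
def pvScanIter (edges : List (Int × Int)) : Nat → List Int → List Int
  | 0, verts => verts
  | k+1, verts => pvScanIter edges k (pvScanA verts edges)

theorem pvScanIter_fix (edges : List (Int × Int)) (k : Nat) (verts : List Int)
    (h : pvScanA verts edges = verts) : pvScanIter edges k verts = verts := by
  induction k with
  | zero => rfl
  | succ k ih => simp [pvScanIter, h, ih]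

theorem pvWalk_eq (edges : List (Int × Int)) (k : Nat) (verts : List Int) (l : Int)
    (h : verts.getLast? = some l) :
    pvWalk (pvAdj edges) k verts = pvScanIter edges k verts := by
  induction k generalizing verts l with
  | zero => rfl
  | succ k ih =>
    have hadj : (pvAdj edges).getD l [] = pvNbrs edges l := by
      simpa [PySem.Dict.getD_empty] using pvAdj_getD edges PySem.Dict.empty l
    have hscan := pvScanA_eq edges verts l h
    simp only [pvWalk, pvScanIter, PySem.List.pyGet?_neg_one, h, Option.getD_some, hadj]
    rcases hfind : (pvNbrs edges l).find? (fun n => !(verts.contains n)) with _ | n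
    · rw [hfind] at hscan
      rw [hscan, pvScanIter_fix edges k verts hscan]
    · rw [hfind] at hscan
      rw [hscan]
      exact ih (verts ++ [n]) n (by simp)

-- ===== VERDICT (by name: the statement is the Claim_ definition above) =====
theorem get_vertices_from_edges_spec : Claim_equal_get_vertices_from_edges := by
  intro edges _ hpre
  unfold Spec_get_vertices_from_edges get_vertices_from_edges get_vertices_from_edges_alt
  rcases edges with _ | ⟨e, rest⟩
  · exact absurd rfl hpre
  · have h0 : PySem.List.pyGet? (e :: rest) 0 = some e := by
      simp
    rw [h0]
    rw [show PySem.List.pyRange 0 3 1 = [0, 1, 2] from by decide]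
    have := pvWalk_eq (e :: rest) 3 [e.1] e.1 (by simp)
    simp only [List.foldl_cons, List.foldl_nil, this, pvScanIter]
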